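-- pv_equiv track=rewrite | github.com/albertodesouza/genomics | scripts/conta_diferencas_genes.py | count_diffs_from_alignment
-- ===== SOURCE A (Python) =====
-- IUPAC = {
--     'A': {'A'}, 'C': {'C'}, 'G': {'G'}, 'T': {'T'},
--     'R': {'A','G'}, 'Y': {'C','T'}, 'S': {'G','C'}, 'W': {'A','T'},
--     'K': {'G','T'}, 'M': {'A','C'},
--     'B': {'C','G','T'}, 'D': {'A','G','T'}, 'H': {'A','C','T'}, 'V': {'A','C','G'},
--     'N': {'A','C','G','T'}
-- }
--
-- def compat(a,b):
--     a=a.upper(); b=b.upper()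
--     if a == '-' or b == '-':
--         return False
--     if a not in IUPAC or b not in IUPAC:
--         return a == b
--     return len(IUPAC[a] & IUPAC[b]) > 0
--
-- def count_diffs_from_alignment(a_aln, b_aln):
--     assert len(a_aln) == len(b_aln)
--     match = diff_sub = diff_gap = ambig_N = 0
--     for x, y in zip(a_aln, b_aln):
--         if x == '-' or y == '-':
--             diff_gap += 1
--             continue
--         if x == 'N' or y == 'N':
--             ambig_N += 1
--             continue
--         if compat(x,y):
--             match += 1
--         else:
--             diff_sub += 1
--     total_cols = len(a_aln)
--     informative = total_cols - ambig_N
--     return {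
--         "aligned_cols": total_cols,
--         "matches": match,
--         "subs": diff_sub,
--         "indels": diff_gap,
--         "ambiguous_N": ambig_N,
--         "differences_total": diff_sub + diff_gap,
--         "informative_cols": informative
--     }
-- ===== SOURCE B (Python) =====
-- IUPAC = {
--     'A': {'A'}, 'C': {'C'}, 'G': {'G'}, 'T': {'T'},
--     'R': {'A','G'}, 'Y': {'C','T'}, 'S': {'G','C'}, 'W': {'A','T'},
--     'K': {'G','T'}, 'M': {'A','C'},
--     'B': {'C','G','T'}, 'D': {'A','G','T'}, 'H': {'A','C','T'}, 'V': {'A','C','G'},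
--     'N': {'A','C','G','T'}
-- }
--
-- def compat(a, b):
--     a = a.upper(); b = b.upper()
--     if a == '-' or b == '-':
--         return False
--     if a not in IUPAC or b not in IUPAC:
--         return a == b
--     return len(IUPAC[a] & IUPAC[b]) > 0
--
-- def count_diffs_from_alignment(a_aln, b_aln):
--     assert len(a_aln) == len(b_aln)
--     cols = list(zip(a_aln, b_aln))
--     indels = sum(1 for x, y in cols if x == '-' or y == '-')
--     ambig_N = sum(1 for x, y in cols
--                   if not (x == '-' or y == '-') and (x == 'N' or y == 'N'))
--     core = [(x, y) for x, y in cols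
--             if x != '-' and y != '-' and x != 'N' and y != 'N']
--     matches = sum(1 for x, y in core if compat(x, y))
--     subs = len(core) - matches
--     total_cols = len(a_aln)
--     return {
--         "aligned_cols": total_cols,
--         "matches": matches,
--         "subs": subs,
--         "indels": indels,
--         "ambiguous_N": ambig_N,
--         "differences_total": subs + indels,
--         "informative_cols": total_cols - ambig_N
--     }
-- ===== Notes on version B (the rewrite author's own statement) =====
-- stated objective: alternative
-- what changed: Replaces A's single stateful loop with four counters by per-category passes: count indels, count non-gap N columns, filter the gap/N-free core columns and count compatible pairs there, deriving subs as the remainder.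
import Mathlib
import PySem

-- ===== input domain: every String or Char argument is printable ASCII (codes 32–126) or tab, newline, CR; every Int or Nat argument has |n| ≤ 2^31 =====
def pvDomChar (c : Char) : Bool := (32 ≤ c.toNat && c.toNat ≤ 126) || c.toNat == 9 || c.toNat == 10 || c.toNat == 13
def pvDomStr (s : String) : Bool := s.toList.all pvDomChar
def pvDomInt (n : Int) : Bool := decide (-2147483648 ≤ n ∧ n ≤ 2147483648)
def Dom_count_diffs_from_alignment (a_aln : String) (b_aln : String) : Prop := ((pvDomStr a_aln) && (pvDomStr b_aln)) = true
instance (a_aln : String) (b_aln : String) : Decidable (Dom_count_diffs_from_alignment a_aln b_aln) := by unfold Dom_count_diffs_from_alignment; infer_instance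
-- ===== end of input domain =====

-- B is an alternative decomposition: per-category counting passes instead of A's single
-- four-counter loop. Equivalence of the RETURN value is proved on Pre_ (equal lengths).

-- ===== PORT A =====
-- module constant IUPAC, as a lookup (Char not in the dict ↦ none)
def iupacGet? : Char → Option (List Char)
  | 'A' => some ['A'] | 'C' => some ['C'] | 'G' => some ['G'] | 'T' => some ['T']
  | 'R' => some ['A','G'] | 'Y' => some ['C','T'] | 'S' => some ['G','C'] | 'W' => some ['A','T']
  | 'K' => some ['G','T'] | 'M' => some ['A','C']
  | 'B' => some ['C','G','T'] | 'D' => some ['A','G','T'] | 'H' => some ['A','C','T'] | 'V' => some ['A','C','G']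
  | 'N' => some ['A','C','G','T']
  | _ => none

-- helper compat (shared by both Pythons verbatim); .upper() on one ASCII char = Char.toUpper
def compat (a b : Char) : Bool :=
  let a := a.toUpper
  let b := b.toUpper
  if a == '-' || b == '-' then false
  else
    match iupacGet? a, iupacGet? b with
    | some sa, some sb => decide (0 < (sa.filter (fun c => sb.contains c)).length)  -- len(IUPAC[a] & IUPAC[b]) > 0
    | _, _ => a == b

-- A's for-loop over zip(a_aln, b_aln) with the four counters (match, sub, gap, N)
def loopA : List (Char × Char) → Nat × Nat × Nat × Nat → Nat × Nat × Nat × Nat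
  | [], st => st
  | (x, y) :: rest, (m, s, g, n) =>
    if x == '-' || y == '-' then loopA rest (m, s, g + 1, n)
    else if x == 'N' || y == 'N' then loopA rest (m, s, g, n + 1)
    else if compat x y then loopA rest (m + 1, s, g, n)
    else loopA rest (m, s + 1, g, n)

def count_diffs_from_alignment (a_aln : String) (b_aln : String) : List (String × Int) :=
  let (m, s, g, n) := loopA (a_aln.toList.zip b_aln.toList) (0, 0, 0, 0)
  let total := a_aln.toList.length
  let informative := total - n
  [("aligned_cols", (total : Int)), ("matches", (m : Int)), ("subs", (s : Int)),
   ("indels", (g : Int)), ("ambiguous_N", (n : Int)),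
   ("differences_total", ((s + g : Nat) : Int)), ("informative_cols", (informative : Int))]

-- ===== PORT B =====
def count_diffs_from_alignment_alt (a_aln : String) (b_aln : String) : List (String × Int) :=
  let cols := a_aln.toList.zip b_aln.toList
  let indels := cols.countP (fun p => p.1 == '-' || p.2 == '-')
  let ambigN := cols.countP (fun p => !(p.1 == '-' || p.2 == '-') && (p.1 == 'N' || p.2 == 'N'))
  let core := cols.filter (fun p => p.1 != '-' && p.2 != '-' && p.1 != 'N' && p.2 != 'N')
  let matchCnt := core.countP (fun p => compat p.1 p.2)
  let subs := core.length - matchCnt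
  let total := a_aln.toList.length
  [("aligned_cols", (total : Int)), ("matches", (matchCnt : Int)), ("subs", (subs : Int)),
   ("indels", (indels : Int)), ("ambiguous_N", (ambigN : Int)),
   ("differences_total", ((subs + indels : Nat) : Int)), ("informative_cols", ((total - ambigN : Nat) : Int))]

-- ===== PRECONDITION & SPEC =====
-- A asserts len(a_aln) == len(b_aln); unequal lengths raise AssertionError.
def Pre_count_diffs_from_alignment (a_aln : String) (b_aln : String) : Prop :=
  a_aln.toList.length = b_aln.toList.length
instance (a_aln : String) (b_aln : String) : Decidable (Pre_count_diffs_from_alignment a_aln b_aln) := by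
  unfold Pre_count_diffs_from_alignment; infer_instance

def pvWitness_count_diffs_from_alignment : String × String := ("A-NnR", "AC-NG")

def Spec_count_diffs_from_alignment (a_aln : String) (b_aln : String) (out : List (String × Int)) : Prop := out = count_diffs_from_alignment_alt a_aln b_aln
instance (a_aln : String) (b_aln : String) (out : List (String × Int)) : Decidable (Spec_count_diffs_from_alignment a_aln b_aln out) := by unfold Spec_count_diffs_from_alignment; infer_instance

-- ===== CLAIM (what is proved, stated in full; the proofs are below) =====
def Claim_equal_count_diffs_from_alignment : Prop := ∀ (a_aln : String) (b_aln : String), Dom_count_diffs_from_alignment a_aln b_aln → Pre_count_diffs_from_alignment a_aln b_aln → Spec_count_diffs_from_alignment a_aln b_aln (count_diffs_from_alignment a_aln b_aln)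

-- ===== LEMMAS AND PROOFS =====

-- column predicates (A's branch order)
def gapP (p : Char × Char) : Bool := p.1 == '-' || p.2 == '-'
def nP   (p : Char × Char) : Bool := !gapP p && (p.1 == 'N' || p.2 == 'N')
def coreP (p : Char × Char) : Bool := !gapP p && !(p.1 == 'N' || p.2 == 'N')
def matchP (p : Char × Char) : Bool := coreP p && compat p.1 p.2
def subP  (p : Char × Char) : Bool := coreP p && !compat p.1 p.2

-- A's loop computes exactly the four category counts
theorem loopA_eq (l : List (Char × Char)) (m s g n : Nat) :
    loopA l (m, s, g, n) =
      (m + l.countP matchP, s + l.countP subP, g + l.countP gapP, n + l.countP nP) := by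
  induction l generalizing m s g n with
  | nil => simp [loopA]
  | cons p rest ih =>
    obtain ⟨x, y⟩ := p
    by_cases hg : (x == '-' || y == '-') = true
    · simp [loopA, hg, ih, matchP, subP, gapP, nP, coreP, Nat.add_assoc,
        Nat.add_comm 1]
    · by_cases hn : (x == 'N' || y == 'N') = true
      · simp [loopA, hg, hn, ih, matchP, subP, gapP, nP, coreP, Nat.add_assoc,
          Nat.add_comm 1]
      · by_cases hc : compat x y = true
        · simp [loopA, hg, hn, hc, ih, matchP, subP, gapP, nP, coreP,
            Nat.add_assoc, Nat.add_comm 1]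
        · simp [loopA, hg, hn, hc, ih, matchP, subP, gapP, nP, coreP,
            Nat.add_assoc, Nat.add_comm 1]

-- the core-column split: countP coreP = countP matchP + countP subP
theorem countP_core_split (l : List (Char × Char)) :
    l.countP coreP = l.countP matchP + l.countP subP := by
  induction l with
  | nil => simp
  | cons p rest ih =>
    simp only [List.countP_cons, matchP, subP]
    by_cases hcore : coreP p = true
    · by_cases hc : compat p.1 p.2 = true <;> simp [hcore, hc, ih] <;> omega
    · simp [hcore, ih]

-- ===== VERDICT (by name: the statement is the Claim_ definition above) =====
theorem count_diffs_from_alignment_spec : Claim_equal_count_diffs_from_alignment := by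
  intro a_aln b_aln _ _
  unfold Spec_count_diffs_from_alignment count_diffs_from_alignment count_diffs_from_alignment_alt
  rw [loopA_eq]
  simp only [Nat.zero_add]
  have hfilter : (a_aln.toList.zip b_aln.toList).filter
      (fun p => p.1 != '-' && p.2 != '-' && p.1 != 'N' && p.2 != 'N') =
      (a_aln.toList.zip b_aln.toList).filter coreP := by
    apply List.filter_congr
    intro p _
    simp [coreP, gapP, Bool.and_assoc, bne]
  have hmatch : ((a_aln.toList.zip b_aln.toList).filter coreP).countP
      (fun p => compat p.1 p.2) = (a_aln.toList.zip b_aln.toList).countP matchP := by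
    rw [List.countP_filter]
    apply List.countP_congr
    intro p _
    simp [matchP, Bool.and_comm]
  have hsub : ((a_aln.toList.zip b_aln.toList).filter coreP).length =
      (a_aln.toList.zip b_aln.toList).countP coreP := by rw [List.countP_eq_length_filter]
  rw [hfilter, hmatch, hsub, countP_core_split]
  have hg : (fun p : Char × Char => p.1 == '-' || p.2 == '-') = gapP := rfl
  have hn : (fun p : Char × Char => !(p.1 == '-' || p.2 == '-') && (p.1 == 'N' || p.2 == 'N')) = nP := rfl
  rw [hg, hn]
  simp
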